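-- pv_equiv track=rewrite | github.com/meghnagram/OPPE1-MAY-2025-SET5 | Section3-Problem1-2025-MAY-SET5.py | count_piece_moves
-- ===== SOURCE A (Python) =====
-- piece_map = {'K': 'King', 'Q': 'Queen', 'R': 'Rook', 'B': 'Bishop', 'N': 'Knight'}
--
-- def count_piece_moves(moves: list) -> dict:
--     """Returns a dictionary with piece names and the number of moves made by that piece.
--
--     During castling a move is counted for both king and rook.
--     """
--
--
--     counts = {p: 0 for p in list(piece_map.values())+["Pawn"]}
--     for move in moves:
--         if move.startswith('O'):
--             counts['King'] += 1
--             counts['Rook'] += 1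
--         else:
--             piece = piece_map.get(move[0], 'Pawn')
--             counts[piece] += 1
--     return counts
-- ===== SOURCE B (Python) =====
-- piece_map = {'K': 'King', 'Q': 'Queen', 'R': 'Rook', 'B': 'Bishop', 'N': 'Knight'}
--
-- def count_piece_moves(moves: list) -> dict:
--     """Per-piece filtered passes instead of a single classifying loop;
--     Pawn is the complement of the lettered pieces, castles are added afterwards."""
--     castles = sum(1 for m in moves if m.startswith('O'))
--     firsts = [m[0] for m in moves if not m.startswith('O')]
--     counts = {name: firsts.count(letter) for letter, name in piece_map.items()}
--     counts['Pawn'] = len(firsts) - sum(counts.values())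
--     counts['King'] += castles
--     counts['Rook'] += castles
--     return counts
-- ===== Notes on version B (the rewrite author's own statement) =====
-- stated objective: alternative
-- what changed: Replaces A's single classifying loop that dispatches each move into a dict via piece_map.get by per-piece filtered passes: one castle count, per-letter counts of the first characters of the non-castling moves, and Pawn computed as the complement of the lettered pieces.
import Mathlib
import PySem

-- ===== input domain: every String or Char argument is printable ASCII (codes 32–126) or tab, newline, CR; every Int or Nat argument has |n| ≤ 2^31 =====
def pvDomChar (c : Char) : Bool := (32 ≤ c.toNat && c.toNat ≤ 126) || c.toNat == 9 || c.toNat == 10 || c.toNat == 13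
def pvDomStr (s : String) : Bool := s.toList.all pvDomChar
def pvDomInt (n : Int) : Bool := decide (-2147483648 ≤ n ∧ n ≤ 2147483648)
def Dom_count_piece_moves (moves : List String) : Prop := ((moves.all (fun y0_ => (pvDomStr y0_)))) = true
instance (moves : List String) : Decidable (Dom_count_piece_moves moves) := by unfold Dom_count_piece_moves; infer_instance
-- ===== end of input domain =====

-- B replaces A's single classifying loop by per-piece filtered counts (castles counted once,
-- letter counts over the first characters of the non-castling moves, Pawn as the complement);
-- objective: alternative decomposition.

-- ===== PORT A =====
def pieceMapA : PySem.Dict Char String :=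
  PySem.Dict.mk [('K', "King"), ('Q', "Queen"), ('R', "Rook"), ('B', "Bishop"), ('N', "Knight")]

def pvStepA (counts : PySem.Dict String Int) (move : String) : PySem.Dict String Int :=
  if PySem.Str.startswith move "O" then
    (counts.modify "King" 0 (· + 1)).modify "Rook" 0 (· + 1)
  else
    let piece := match PySem.Str.pyGet? move 0 with
      | some c => pieceMapA.getD c "Pawn"
      | none => "Pawn"  -- Python raises IndexError here (empty move string); excluded by Pre_
    counts.modify piece 0 (· + 1)

def count_piece_moves (moves : List String) : List (String × Int) :=
  let counts : PySem.Dict String Int :=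
    ((PySem.Dict.values pieceMapA) ++ ["Pawn"]).foldl (fun d p => d.insert p 0) PySem.Dict.empty
  (moves.foldl pvStepA counts).items

-- ===== PORT B =====
def count_piece_moves_alt (moves : List String) : List (String × Int) :=
  let castles : Int :=
    moves.foldl (fun acc m => if PySem.Str.startswith m "O" then acc + 1 else acc) 0
  let firsts : List Char :=
    (moves.filter (fun m => !(PySem.Str.startswith m "O"))).map
      (fun m => (PySem.Str.pyGet? m 0).getD ' ')  -- Python raises IndexError on none (empty move string); excluded by Pre_
  let counts : PySem.Dict String Int :=
    (PySem.Dict.items pieceMapA).foldl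
      (fun d lp => d.insert lp.2 ((PySem.List.count firsts lp.1 : Int)))
      PySem.Dict.empty
  let counts := counts.insert "Pawn" ((firsts.length : Int) - counts.values.sum)
  let counts := counts.modify "King" 0 (· + castles)
  let counts := counts.modify "Rook" 0 (· + castles)
  counts.items

-- ===== PRECONDITION & SPEC =====
-- Pre_ excludes lists containing an empty move string: there A raises IndexError on move[0] (B raises there too).
def Pre_count_piece_moves (moves : List String) : Prop := ∀ m ∈ moves, m ≠ ""
instance (moves : List String) : Decidable (Pre_count_piece_moves moves) := by
  unfold Pre_count_piece_moves; infer_instance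

def pvWitness_count_piece_moves : List String := ["O-O", "Nf3", "e4", "Qxd5"]

def Spec_count_piece_moves (moves : List String) (out : List (String × Int)) : Prop :=
  out = count_piece_moves_alt moves
instance (moves : List String) (out : List (String × Int)) : Decidable (Spec_count_piece_moves moves out) := by
  unfold Spec_count_piece_moves; infer_instance

-- ===== CLAIM (what is proved, stated in full; the proofs are below) =====
def Claim_equal_count_piece_moves : Prop := ∀ (moves : List String),
  Dom_count_piece_moves moves → Pre_count_piece_moves moves →
  Spec_count_piece_moves moves (count_piece_moves moves)

-- ===== LEMMAS AND PROOFS =====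

-- proof-only abbreviations for the classifying predicates
def pvSw (m : String) : Bool := PySem.Str.startswith m "O"
def pvIsL (c : Char) (m : String) : Bool := m.toList.head? == some c
def pvPc (c : Char) (m : String) : Bool := !pvSw m && pvIsL c m
def pvPp (m : String) : Bool :=
  !pvSw m && !(pvIsL 'K' m || pvIsL 'Q' m || pvIsL 'R' m || pvIsL 'B' m || pvIsL 'N' m)

lemma pvA_fold (moves : List String) (h : ∀ m ∈ moves, m ≠ "")
    (kv qv rv bv nv pv : Int) :
    moves.foldl pvStepA
      (PySem.Dict.mk [("King", kv), ("Queen", qv), ("Rook", rv), ("Bishop", bv), ("Knight", nv), ("Pawn", pv)]) =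
    PySem.Dict.mk [("King", kv + (moves.countP pvSw : Int) + (moves.countP (pvPc 'K') : Int)),
                   ("Queen", qv + (moves.countP (pvPc 'Q') : Int)),
                   ("Rook", rv + (moves.countP pvSw : Int) + (moves.countP (pvPc 'R') : Int)),
                   ("Bishop", bv + (moves.countP (pvPc 'B') : Int)),
                   ("Knight", nv + (moves.countP (pvPc 'N') : Int)),
                   ("Pawn", pv + (moves.countP pvPp : Int))] := by
  induction moves generalizing kv qv rv bv nv pv with
  | nil => simp
  | cons m ms ih =>
    have hm : m ≠ "" := h m (List.mem_cons_self ..)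
    have hms : ∀ x ∈ ms, x ≠ "" := fun x hx => h x (List.mem_cons_of_mem _ hx)
    obtain ⟨c, cs, hcs⟩ : ∃ c cs, m.toList = c :: cs := by
      cases hcl : m.toList with
      | nil => exact absurd (by simpa using congrArg String.ofList hcl) hm
      | cons c cs => exact ⟨c, cs, rfl⟩
    have hhead : m.toList.head? = some c := by rw [hcs]; rfl
    simp only [List.foldl_cons]
    by_cases hsw : PySem.Str.startswith m "O"
    · have hswc : PySem.Chars.startswith m.toList ['O'] = true := by simpa using hsw
      rw [show pvStepA (PySem.Dict.mk [("King", kv), ("Queen", qv), ("Rook", rv), ("Bishop", bv), ("Knight", nv), ("Pawn", pv)]) m =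
          PySem.Dict.mk [("King", kv + 1), ("Queen", qv), ("Rook", rv + 1), ("Bishop", bv), ("Knight", nv), ("Pawn", pv)] from by
        unfold pvStepA
        rw [if_pos hsw]
        simp [PySem.Dict.modify, PySem.Dict.insert, PySem.Dict.getD, PySem.Dict.get?, PySem.Dict.contains]]
      rw [ih hms]
      have hb0 : pvSw m = true := hsw
      have hbK : pvPc 'K' m = false := by simp [pvPc, pvSw, hswc]
      have hbQ : pvPc 'Q' m = false := by simp [pvPc, pvSw, hswc]
      have hbR : pvPc 'R' m = false := by simp [pvPc, pvSw, hswc]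
      have hbB : pvPc 'B' m = false := by simp [pvPc, pvSw, hswc]
      have hbN : pvPc 'N' m = false := by simp [pvPc, pvSw, hswc]
      have hbP : pvPp m = false := by simp [pvPp, pvSw, pvIsL, hswc, hhead]
      simp only [List.countP_cons, hb0, hbK, hbQ, hbR, hbB, hbN, hbP, if_true,
        PySem.Dict.mk.injEq, List.cons.injEq, Prod.mk.injEq, and_true, true_and]
      push_cast
      omega
    · have hswc : PySem.Chars.startswith m.toList ['O'] = false := by simpa using hsw
      have hget : PySem.Str.pyGet? m 0 = some c := by
        simp [hcs, PySem.List.pyGet?_zero_cons]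
      rw [show pvStepA (PySem.Dict.mk [("King", kv), ("Queen", qv), ("Rook", rv), ("Bishop", bv), ("Knight", nv), ("Pawn", pv)]) m =
          (PySem.Dict.mk [("King", kv), ("Queen", qv), ("Rook", rv), ("Bishop", bv), ("Knight", nv), ("Pawn", pv)]).modify (pieceMapA.getD c "Pawn") 0 (· + 1) from by
        unfold pvStepA
        rw [if_neg hsw, hget]]
      by_cases hc : c = 'K'
      · rw [show pieceMapA.getD c "Pawn" = "King" from by subst hc; rfl]
        rw [show ((PySem.Dict.mk [("King", kv), ("Queen", qv), ("Rook", rv), ("Bishop", bv), ("Knight", nv), ("Pawn", pv)]).modify "King" 0 (· + 1)) =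
            PySem.Dict.mk [("King", kv + 1), ("Queen", qv), ("Rook", rv), ("Bishop", bv), ("Knight", nv), ("Pawn", pv)] from by
          simp [PySem.Dict.modify, PySem.Dict.insert, PySem.Dict.getD, PySem.Dict.get?, PySem.Dict.contains]]
        rw [ih hms]
        have hb0 : pvSw m = false := by simp [pvSw, hswc]
        have hbK : pvPc 'K' m = true := by simp [pvPc, pvSw, pvIsL, hswc, hhead, hc]
        have hbQ : pvPc 'Q' m = false := by simp [pvPc, pvSw, pvIsL, hswc, hhead, hc]
        have hbR : pvPc 'R' m = false := by simp [pvPc, pvSw, pvIsL, hswc, hhead, hc]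
        have hbB : pvPc 'B' m = false := by simp [pvPc, pvSw, pvIsL, hswc, hhead, hc]
        have hbN : pvPc 'N' m = false := by simp [pvPc, pvSw, pvIsL, hswc, hhead, hc]
        have hbP : pvPp m = false := by simp [pvPp, pvSw, pvIsL, hswc, hhead, hc]
        simp only [List.countP_cons, hb0, hbK, hbQ, hbR, hbB, hbN, hbP, if_true,
          PySem.Dict.mk.injEq, List.cons.injEq, Prod.mk.injEq, and_true, true_and]
        push_cast
        omega
      have hK : ¬ c = 'K' := hc
      by_cases hc : c = 'Q'
      · rw [show pieceMapA.getD c "Pawn" = "Queen" from by subst hc; rfl]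
        rw [show ((PySem.Dict.mk [("King", kv), ("Queen", qv), ("Rook", rv), ("Bishop", bv), ("Knight", nv), ("Pawn", pv)]).modify "Queen" 0 (· + 1)) =
            PySem.Dict.mk [("King", kv), ("Queen", qv + 1), ("Rook", rv), ("Bishop", bv), ("Knight", nv), ("Pawn", pv)] from by
          simp [PySem.Dict.modify, PySem.Dict.insert, PySem.Dict.getD, PySem.Dict.get?, PySem.Dict.contains]]
        rw [ih hms]
        have hb0 : pvSw m = false := by simp [pvSw, hswc]
        have hbK : pvPc 'K' m = false := by simp [pvPc, pvSw, pvIsL, hswc, hhead, hc]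
        have hbQ : pvPc 'Q' m = true := by simp [pvPc, pvSw, pvIsL, hswc, hhead, hc]
        have hbR : pvPc 'R' m = false := by simp [pvPc, pvSw, pvIsL, hswc, hhead, hc]
        have hbB : pvPc 'B' m = false := by simp [pvPc, pvSw, pvIsL, hswc, hhead, hc]
        have hbN : pvPc 'N' m = false := by simp [pvPc, pvSw, pvIsL, hswc, hhead, hc]
        have hbP : pvPp m = false := by simp [pvPp, pvSw, pvIsL, hswc, hhead, hc]
        simp only [List.countP_cons, hb0, hbK, hbQ, hbR, hbB, hbN, hbP, if_true,
          PySem.Dict.mk.injEq, List.cons.injEq, Prod.mk.injEq, and_true, true_and]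
        push_cast
        omega
      have hQ : ¬ c = 'Q' := hc
      by_cases hc : c = 'R'
      · rw [show pieceMapA.getD c "Pawn" = "Rook" from by subst hc; rfl]
        rw [show ((PySem.Dict.mk [("King", kv), ("Queen", qv), ("Rook", rv), ("Bishop", bv), ("Knight", nv), ("Pawn", pv)]).modify "Rook" 0 (· + 1)) =
            PySem.Dict.mk [("King", kv), ("Queen", qv), ("Rook", rv + 1), ("Bishop", bv), ("Knight", nv), ("Pawn", pv)] from by
          simp [PySem.Dict.modify, PySem.Dict.insert, PySem.Dict.getD, PySem.Dict.get?, PySem.Dict.contains]]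
        rw [ih hms]
        have hb0 : pvSw m = false := by simp [pvSw, hswc]
        have hbK : pvPc 'K' m = false := by simp [pvPc, pvSw, pvIsL, hswc, hhead, hc]
        have hbQ : pvPc 'Q' m = false := by simp [pvPc, pvSw, pvIsL, hswc, hhead, hc]
        have hbR : pvPc 'R' m = true := by simp [pvPc, pvSw, pvIsL, hswc, hhead, hc]
        have hbB : pvPc 'B' m = false := by simp [pvPc, pvSw, pvIsL, hswc, hhead, hc]
        have hbN : pvPc 'N' m = false := by simp [pvPc, pvSw, pvIsL, hswc, hhead, hc]
        have hbP : pvPp m = false := by simp [pvPp, pvSw, pvIsL, hswc, hhead, hc]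
        simp only [List.countP_cons, hb0, hbK, hbQ, hbR, hbB, hbN, hbP, if_true,
          PySem.Dict.mk.injEq, List.cons.injEq, Prod.mk.injEq, and_true, true_and]
        push_cast
        omega
      have hR : ¬ c = 'R' := hc
      by_cases hc : c = 'B'
      · rw [show pieceMapA.getD c "Pawn" = "Bishop" from by subst hc; rfl]
        rw [show ((PySem.Dict.mk [("King", kv), ("Queen", qv), ("Rook", rv), ("Bishop", bv), ("Knight", nv), ("Pawn", pv)]).modify "Bishop" 0 (· + 1)) =
            PySem.Dict.mk [("King", kv), ("Queen", qv), ("Rook", rv), ("Bishop", bv + 1), ("Knight", nv), ("Pawn", pv)] from by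
          simp [PySem.Dict.modify, PySem.Dict.insert, PySem.Dict.getD, PySem.Dict.get?, PySem.Dict.contains]]
        rw [ih hms]
        have hb0 : pvSw m = false := by simp [pvSw, hswc]
        have hbK : pvPc 'K' m = false := by simp [pvPc, pvSw, pvIsL, hswc, hhead, hc]
        have hbQ : pvPc 'Q' m = false := by simp [pvPc, pvSw, pvIsL, hswc, hhead, hc]
        have hbR : pvPc 'R' m = false := by simp [pvPc, pvSw, pvIsL, hswc, hhead, hc]
        have hbB : pvPc 'B' m = true := by simp [pvPc, pvSw, pvIsL, hswc, hhead, hc]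
        have hbN : pvPc 'N' m = false := by simp [pvPc, pvSw, pvIsL, hswc, hhead, hc]
        have hbP : pvPp m = false := by simp [pvPp, pvSw, pvIsL, hswc, hhead, hc]
        simp only [List.countP_cons, hb0, hbK, hbQ, hbR, hbB, hbN, hbP, if_true,
          PySem.Dict.mk.injEq, List.cons.injEq, Prod.mk.injEq, and_true, true_and]
        push_cast
        omega
      have hB : ¬ c = 'B' := hc
      by_cases hc : c = 'N'
      · rw [show pieceMapA.getD c "Pawn" = "Knight" from by subst hc; rfl]
        rw [show ((PySem.Dict.mk [("King", kv), ("Queen", qv), ("Rook", rv), ("Bishop", bv), ("Knight", nv), ("Pawn", pv)]).modify "Knight" 0 (· + 1)) =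
            PySem.Dict.mk [("King", kv), ("Queen", qv), ("Rook", rv), ("Bishop", bv), ("Knight", nv + 1), ("Pawn", pv)] from by
          simp [PySem.Dict.modify, PySem.Dict.insert, PySem.Dict.getD, PySem.Dict.get?, PySem.Dict.contains]]
        rw [ih hms]
        have hb0 : pvSw m = false := by simp [pvSw, hswc]
        have hbK : pvPc 'K' m = false := by simp [pvPc, pvSw, pvIsL, hswc, hhead, hc]
        have hbQ : pvPc 'Q' m = false := by simp [pvPc, pvSw, pvIsL, hswc, hhead, hc]
        have hbR : pvPc 'R' m = false := by simp [pvPc, pvSw, pvIsL, hswc, hhead, hc]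
        have hbB : pvPc 'B' m = false := by simp [pvPc, pvSw, pvIsL, hswc, hhead, hc]
        have hbN : pvPc 'N' m = true := by simp [pvPc, pvSw, pvIsL, hswc, hhead, hc]
        have hbP : pvPp m = false := by simp [pvPp, pvSw, pvIsL, hswc, hhead, hc]
        simp only [List.countP_cons, hb0, hbK, hbQ, hbR, hbB, hbN, hbP, if_true,
          PySem.Dict.mk.injEq, List.cons.injEq, Prod.mk.injEq, and_true, true_and]
        push_cast
        omega
      have hN : ¬ c = 'N' := hc
      rw [show pieceMapA.getD c "Pawn" = "Pawn" from by
        simp [pieceMapA, PySem.Dict.getD, PySem.Dict.get?, List.find?,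
          show ('K' == c) = false from by simp [beq_eq_false_iff_ne]; exact fun h => hK h.symm,
          show ('Q' == c) = false from by simp [beq_eq_false_iff_ne]; exact fun h => hQ h.symm,
          show ('R' == c) = false from by simp [beq_eq_false_iff_ne]; exact fun h => hR h.symm,
          show ('B' == c) = false from by simp [beq_eq_false_iff_ne]; exact fun h => hB h.symm,
          show ('N' == c) = false from by simp [beq_eq_false_iff_ne]; exact fun h => hN h.symm]]
      rw [show ((PySem.Dict.mk [("King", kv), ("Queen", qv), ("Rook", rv), ("Bishop", bv), ("Knight", nv), ("Pawn", pv)]).modify "Pawn" 0 (· + 1)) =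
          PySem.Dict.mk [("King", kv), ("Queen", qv), ("Rook", rv), ("Bishop", bv), ("Knight", nv), ("Pawn", pv + 1)] from by
        simp [PySem.Dict.modify, PySem.Dict.insert, PySem.Dict.getD, PySem.Dict.get?, PySem.Dict.contains]]
      rw [ih hms]
      have hb0 : pvSw m = false := by simp [pvSw, hswc]
      have hbK : pvPc 'K' m = false := by simp [pvPc, pvSw, pvIsL, hswc, hhead]; exact hK
      have hbQ : pvPc 'Q' m = false := by simp [pvPc, pvSw, pvIsL, hswc, hhead]; exact hQ
      have hbR : pvPc 'R' m = false := by simp [pvPc, pvSw, pvIsL, hswc, hhead]; exact hR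
      have hbB : pvPc 'B' m = false := by simp [pvPc, pvSw, pvIsL, hswc, hhead]; exact hB
      have hbN : pvPc 'N' m = false := by simp [pvPc, pvSw, pvIsL, hswc, hhead]; exact hN
      have hbP : pvPp m = true := by
        simp [pvPp, pvSw, pvIsL, hswc, hhead]
        exact ⟨⟨⟨⟨hK, hQ⟩, hR⟩, hB⟩, hN⟩
      simp only [List.countP_cons, hb0, hbK, hbQ, hbR, hbB, hbN, hbP, if_true,
        PySem.Dict.mk.injEq, List.cons.injEq, Prod.mk.injEq, and_true, true_and]
      push_cast
      omega

lemma pvCount (moves : List String) (h : ∀ m ∈ moves, m ≠ "") (c : Char) :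
    List.count c (List.map (fun m => (PySem.List.pyGet? m.toList 0).getD ' ') (List.filter (fun m => !PySem.Chars.startswith m.toList ['O']) moves)) = List.countP (pvPc c) moves := by
  rw [List.count_eq_countP, List.countP_map, List.countP_filter]
  apply List.countP_congr
  intro m hm
  obtain ⟨c', cs, hcs⟩ : ∃ c' cs, m.toList = c' :: cs := by
    cases hcl : m.toList with
    | nil => exact absurd (by simpa using congrArg String.ofList hcl) (h m hm)
    | cons c' cs => exact ⟨c', cs, rfl⟩
  have hget : PySem.List.pyGet? m.toList 0 = some c' := by
    rw [hcs]; exact PySem.List.pyGet?_zero_cons ..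
  simp [Function.comp, pvPc, pvSw, pvIsL, hget, hcs]
  tauto

lemma pvElem (m : String) :
    (if pvPc 'K' m then 1 else 0) + (if pvPc 'Q' m then 1 else 0) + (if pvPc 'R' m then 1 else 0)
      + (if pvPc 'B' m then 1 else 0) + (if pvPc 'N' m then 1 else 0) + (if pvPp m then 1 else 0)
      = (if !pvSw m then (1 : Nat) else 0) := by
  rcases hh : m.toList.head? with _ | ch
  · cases hsw : pvSw m <;> simp [pvPc, pvPp, pvIsL, hh, hsw]
  · cases hsw : pvSw m
    · by_cases h1 : ch = 'K' <;> by_cases h2 : ch = 'Q' <;> by_cases h3 : ch = 'R' <;>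
        by_cases h4 : ch = 'B' <;> by_cases h5 : ch = 'N' <;>
        simp_all [pvPc, pvPp, pvIsL]
    · simp [pvPc, pvPp, pvIsL, hsw]

lemma pvPartition (moves : List String) :
    List.countP (pvPc 'K') moves + List.countP (pvPc 'Q') moves + List.countP (pvPc 'R') moves
      + List.countP (pvPc 'B') moves + List.countP (pvPc 'N') moves + List.countP pvPp moves
      = List.countP (fun m => !pvSw m) moves := by
  induction moves with
  | nil => simp
  | cons m ms ih =>
    simp only [List.countP_cons]
    have := pvElem m
    omega

lemma pvB_eq (moves : List String) (h : ∀ m ∈ moves, m ≠ "") :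
    count_piece_moves_alt moves =
      [("King", (List.countP (pvPc 'K') moves : Int) + (List.countP pvSw moves : Int)),
       ("Queen", (List.countP (pvPc 'Q') moves : Int)),
       ("Rook", (List.countP (pvPc 'R') moves : Int) + (List.countP pvSw moves : Int)),
       ("Bishop", (List.countP (pvPc 'B') moves : Int)),
       ("Knight", (List.countP (pvPc 'N') moves : Int)),
       ("Pawn", (List.countP pvPp moves : Int))] := by
  unfold count_piece_moves_alt
  simp only [PySem.List.foldl_count_if]
  simp [pieceMapA, PySem.Dict.insert, PySem.Dict.empty, PySem.Dict.contains,
    PySem.Dict.modify, PySem.Dict.getD, PySem.Dict.get?, PySem.Dict.values, List.foldl,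
    PySem.List.count]
  rw [pvCount moves h 'K', pvCount moves h 'Q', pvCount moves h 'R',
    pvCount moves h 'B', pvCount moves h 'N']
  rw [show (fun x => PySem.Chars.startswith x.toList ['O']) = pvSw from by funext m; simp [pvSw]]
  rw [show (List.filter (fun m => !PySem.Chars.startswith m.toList ['O']) moves).length
        = List.countP (fun m => !pvSw m) moves from by
      rw [List.countP_eq_length_filter]
      simp [pvSw]]
  have hp := pvPartition moves
  simp only [List.cons.injEq, Prod.mk.injEq, true_and, and_true]
  omega

-- ===== VERDICT (by name: the statement is the Claim_ definition above) =====
theorem count_piece_moves_spec : Claim_equal_count_piece_moves := by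
  intro moves _ hpre
  unfold Spec_count_piece_moves
  show (List.foldl pvStepA (PySem.Dict.mk [("King", (0:Int)), ("Queen", (0:Int)), ("Rook", (0:Int)),
      ("Bishop", (0:Int)), ("Knight", (0:Int)), ("Pawn", (0:Int))]) moves).items = count_piece_moves_alt moves
  rw [pvA_fold moves hpre 0 0 0 0 0 0, pvB_eq moves hpre]
  simp only [List.cons.injEq, Prod.mk.injEq, true_and, and_true]
  norm_num
  omega
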